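-- pv_equiv track=rewrite | github.com/bjkemp/context-engineering-intro | adventure-agent/src/adventure_agent/tools/branch_pruner.py | _has_path_to_ending
-- ===== SOURCE A (Python) =====
-- from typing import Dict, List, Set, Tuple
--
-- def _has_path_to_ending(step_id: str, graph: Dict[str, Set[str]], visited: Set[str]) -> bool:
--     """Check if a step has any path to an ending."""
--
--     if step_id in visited:
--         return False  # Circular reference
--
--     visited.add(step_id)
--
--     if step_id not in graph:
--         return False
--
--     connections = graph[step_id]
--
--     for target in connections:
--         if target.startswith("ENDING_"):
--             return True
--         elif target.startswith("STEP_") or target.isdigit():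
--             target_clean = target.replace("STEP_", "") if target.startswith("STEP_") else target
--             if _has_path_to_ending(target_clean, graph, visited.copy()):
--                 return True
--
--     return False
-- ===== SOURCE B (Python) =====
-- def _has_path_to_ending(step_id, graph, visited):
--     """Check if a step has any path to an ending.
--
--     Backward fixpoint (dynamic programming) instead of A's per-path recursion:
--     saturate the set `good` of nodes from which an ending is reachable while
--     avoiding `visited`, then test step_id.  Mirrors A's only observable
--     mutation (step_id ends up in the caller's `visited` set).
--     """
--     blocked = set(visited)
--     visited.add(step_id)
--     good = set()
--     for _ in range(len(graph)):
--         added = False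
--         for node, conns in graph.items():
--             if node in blocked or node in good:
--                 continue
--             ok = False
--             for t in conns:
--                 if t.startswith("ENDING_"):
--                     ok = True
--                 elif t.startswith("STEP_"):
--                     if t.replace("STEP_", "") in good:
--                         ok = True
--                 elif t.isdigit():
--                     if t in good:
--                         ok = True
--             if ok:
--                 good.add(node)
--                 added = True
--         if not added:
--             break
--     return step_id in good
-- ===== Notes on version B (the rewrite author's own statement) =====
-- stated objective: alternative
-- what changed: Replaced A's per-path recursion (a fresh visited.copy() for every explored edge, re-exploring shared subgraphs once per path) by a backward dynamic-programming fixpoint: saturate the set of nodes that can reach an ENDING_ connection while avoiding `visited`, then test step_id by membership.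
import Mathlib
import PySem

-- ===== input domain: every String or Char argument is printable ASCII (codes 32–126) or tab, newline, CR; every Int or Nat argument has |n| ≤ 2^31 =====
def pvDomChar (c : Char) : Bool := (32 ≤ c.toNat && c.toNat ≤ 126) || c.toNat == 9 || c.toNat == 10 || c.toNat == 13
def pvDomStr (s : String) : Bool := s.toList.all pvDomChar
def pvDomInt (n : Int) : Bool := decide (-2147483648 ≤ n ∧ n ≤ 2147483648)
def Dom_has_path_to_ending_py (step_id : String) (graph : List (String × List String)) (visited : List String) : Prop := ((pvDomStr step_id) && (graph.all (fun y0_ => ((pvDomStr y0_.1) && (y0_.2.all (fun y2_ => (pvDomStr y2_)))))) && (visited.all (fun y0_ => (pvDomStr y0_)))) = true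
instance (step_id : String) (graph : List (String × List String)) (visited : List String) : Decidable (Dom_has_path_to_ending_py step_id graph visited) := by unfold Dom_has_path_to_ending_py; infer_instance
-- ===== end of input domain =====

-- B replaces A's per-path recursion (a fresh `visited.copy()` per branch) by a backward
-- dynamic-programming fixpoint over the set of nodes that can reach an ending (objective:
-- alternative).  Both Pythons mutate the caller's `visited` identically (step_id ends up in
-- it); the equivalence proved here is about the RETURN value.

-- ===== PORT A =====
-- termination measure for A's recursion (visited strictly gains a graph key on every call)
def pvMeasure (graph : List (String × List String)) (visited : List String) : Nat :=
  ((graph.map Prod.fst).filter (fun k => !(PySem.Set.contains visited k))).length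

-- support lemma for the measure (used by `decreasing_by`)
theorem pv_countP_lt {α : Type} (l : List α) (p q : α → Bool)
    (himp : ∀ x ∈ l, q x = true → p x = true) (x0 : α) (h0 : x0 ∈ l)
    (hp : p x0 = true) (hq : ¬ q x0 = true) : l.countP q < l.countP p := by
  induction l with
  | nil => simp at h0
  | cons a t ih =>
    have hmono : t.countP q ≤ t.countP p :=
      List.countP_mono_left (fun x hx => himp x (List.mem_cons_of_mem a hx))
    rw [List.countP_cons, List.countP_cons]
    rcases List.mem_cons.mp h0 with rfl | hmem
    · have e1 : (if q x0 = true then 1 else 0) = 0 := by simp [hq]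
      have e2 : (if p x0 = true then 1 else 0) = 1 := by simp [hp]
      omega
    · have := ih (fun x hx h => himp x (List.mem_cons_of_mem a hx) h) hmem
      have e1 : (if q a = true then 1 else 0) ≤ (if p a = true then 1 else 0) := by
        by_cases hqa : q a = true
        · simp [hqa, himp a List.mem_cons_self hqa]
        · simp [hqa]
      omega

theorem pv_lookup_mem_keys {β : Type} (l : List (String × β)) (a : String) (b : β)
    (h : List.lookup a l = some b) : a ∈ l.map Prod.fst := by
  induction l with
  | nil => simp [List.lookup] at h
  | cons p t ih =>
    obtain ⟨k, v⟩ := p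
    rw [List.lookup] at h
    by_cases hpa : a == k
    · have h2 : a = k := by simpa using hpa
      exact List.mem_map.mpr ⟨(k, v), List.mem_cons_self, h2.symm⟩
    · have hpa2 : (a == k) = false := by simpa using hpa
      rw [hpa2] at h
      rw [List.map_cons]
      exact List.mem_cons_of_mem _ (ih h)

theorem pv_measure_lt (graph : List (String × List String)) (visited : List String)
    (s : String) (hk : s ∈ graph.map Prod.fst) (hns : PySem.Set.contains visited s = false) :
    pvMeasure graph (PySem.Set.add visited s) < pvMeasure graph visited := by
  unfold pvMeasure
  rw [← List.countP_eq_length_filter, ← List.countP_eq_length_filter]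
  apply pv_countP_lt _ _ _ ?_ s hk ?_ ?_
  · intro x hx h
    simp only [Bool.not_eq_true'] at h ⊢
    rw [← Bool.not_eq_true] at h ⊢
    intro hc
    exact h ((PySem.Set.contains_iff (PySem.Set.add visited s) x).mpr
      ((PySem.Set.mem_add visited s x).mpr (Or.inl ((PySem.Set.contains_iff visited x).mp hc))))
  · simp only [Bool.not_eq_true']
    exact hns
  · intro h
    have h1 : s ∉ PySem.Set.add visited s := by simpa using h
    exact h1 ((PySem.Set.mem_add visited s s).mpr (Or.inr rfl))

def has_path_to_ending_py (step_id : String) (graph : List (String × List String)) (visited : List String) : Bool :=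
  if PySem.Set.contains visited step_id then false           -- if step_id in visited: return False
  else
    match h : List.lookup step_id graph with                 -- if step_id not in graph: return False
    | none => false
    | some connections =>                                    -- connections = graph[step_id]
      connections.any (fun target =>                         -- for target in connections (early return)
        if PySem.Str.startswith target "ENDING_" then true
        else if PySem.Str.startswith target "STEP_" || PySem.Str.strIsdigit target then
          has_path_to_ending_py
            (if PySem.Str.startswith target "STEP_" then PySem.Str.replace target "STEP_" "" else target)
            graph (PySem.Set.add visited step_id)            -- visited.copy() with step_id added
        else false)
termination_by pvMeasure graph visited
decreasing_by
  exact pv_measure_lt graph visited step_id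
    (pv_lookup_mem_keys graph step_id connections h) (by simpa using ‹¬ PySem.Set.contains visited step_id = true›)

-- ===== PORT B =====
-- 'ok' after B's inner loop over one node's connection list
def hpB_rowOk (good : PySem.Set String) (conns : List String) : Bool :=
  conns.foldl (fun ok t =>
    if PySem.Str.startswith t "ENDING_" then true
    else if PySem.Str.startswith t "STEP_" then
      (if PySem.Set.contains good (PySem.Str.replace t "STEP_" "") then true else ok)
    else if PySem.Str.strIsdigit t then
      (if PySem.Set.contains good t then true else ok)
    else ok) false

-- one `for node, conns in graph.items()` body of B's saturation loop; state = (good, added)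
def hpB_step (blocked : PySem.Set String) (st : PySem.Set String × Bool) (entry : String × List String) : PySem.Set String × Bool :=
  if PySem.Set.contains blocked entry.1 || PySem.Set.contains st.1 entry.1 then st
  else if hpB_rowOk st.1 entry.2 then (PySem.Set.add st.1 entry.1, true) else st

-- one round of the saturation loop; state = (good, stopped-by-break)
def hpB_outer (blocked : PySem.Set String) (graph : List (String × List String)) (st : PySem.Set String × Bool) (i : Nat) : PySem.Set String × Bool :=
  if st.2 then st                                             -- loop already left by `break`
  else
    match graph.foldl (hpB_step blocked) (st.1, false) with   -- added = False; for node, conns in graph.items(): …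
    | (good, added) => (good, !added)                         -- if not added: break

def has_path_to_ending_py_alt (step_id : String) (graph : List (String × List String)) (visited : List String) : Bool :=
  PySem.Set.contains                                          -- return step_id in good
    ((List.range graph.length).foldl                          -- for _ in range(len(graph)):
      (hpB_outer (PySem.Set.ofList visited) graph)            --   (blocked = set(visited))
      (PySem.Set.empty, false)).1                             -- good = set()
    step_id

-- ===== PRECONDITION & SPEC =====
-- Pre_ only rules out association lists with a repeated key: `graph` encodes a Python dict,
-- whose keys are necessarily distinct, so no Python input is excluded.
def Pre_has_path_to_ending_py (step_id : String) (graph : List (String × List String)) (visited : List String) : Prop :=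
  (graph.map Prod.fst).Nodup
instance (step_id : String) (graph : List (String × List String)) (visited : List String) : Decidable (Pre_has_path_to_ending_py step_id graph visited) := by unfold Pre_has_path_to_ending_py; infer_instance

def pvWitness_has_path_to_ending_py : String × (List (String × List String)) × List String :=
  ("1", [("1", ["2", "x"]), ("2", ["ENDING_a"])], ["3"])

def Spec_has_path_to_ending_py (step_id : String) (graph : List (String × List String)) (visited : List String) (out : Bool) : Prop := out = has_path_to_ending_py_alt step_id graph visited
instance (step_id : String) (graph : List (String × List String)) (visited : List String) (out : Bool) : Decidable (Spec_has_path_to_ending_py step_id graph visited out) := by unfold Spec_has_path_to_ending_py; infer_instance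

-- ===== CLAIM (what is proved, stated in full; the proofs are below) =====
def Claim_equal_has_path_to_ending_py : Prop := ∀ (step_id : String) (graph : List (String × List String)) (visited : List String), Dom_has_path_to_ending_py step_id graph visited → Pre_has_path_to_ending_py step_id graph visited → Spec_has_path_to_ending_py step_id graph visited (has_path_to_ending_py step_id graph visited)

-- ===== LEMMAS AND PROOFS =====

def hp_hasEnding (graph : List (String × List String)) (u : String) : Bool :=
  ((List.lookup u graph).getD []).any (fun t => PySem.Str.startswith t "ENDING_")

-- `target` is followed by A exactly when it has this shape; then this is the node it goes to
def pvShape (t : String) : Bool := PySem.Str.startswith t "STEP_" || PySem.Str.strIsdigit t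
def pvClean (t : String) : String := if PySem.Str.startswith t "STEP_" then PySem.Str.replace t "STEP_" "" else t

def hp_succ (graph : List (String × List String)) (u : String) : List String :=
  ((List.lookup u graph).getD []).filterMap (fun t => if pvShape t then some (pvClean t) else none)

theorem mem_hp_succ (graph : List (String × List String)) (u v : String) :
    v ∈ hp_succ graph u ↔
      ∃ t ∈ (List.lookup u graph).getD [], pvShape t = true ∧ pvClean t = v := by
  rw [hp_succ, List.mem_filterMap]
  constructor
  · rintro ⟨t, ht, hsome⟩
    by_cases hs : pvShape t = true
    · exact ⟨t, ht, hs, by simpa [hs] using hsome⟩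
    · simp [hs] at hsome
  · rintro ⟨t, ht, hs, hc⟩
    exact ⟨t, ht, by simp [hs, hc]⟩

-- walks to an ending: WalkFrom graph vis s l means s,l are a walk avoiding vis whose last node has an ENDING_ connection
def WalkFrom (graph : List (String × List String)) (vis : List String) : String → List String → Prop
  | s, [] => s ∉ vis ∧ hp_hasEnding graph s = true
  | s, t :: l => s ∉ vis ∧ t ∈ hp_succ graph s ∧ WalkFrom graph vis t l

theorem walk_avoid (graph : List (String × List String)) (vis : List String) :
    ∀ (l : List String) (s : String), WalkFrom graph vis s l → ∀ x ∈ s :: l, x ∉ vis := by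
  intro l
  induction l with
  | nil => rintro s ⟨h1, _⟩ x hx; rw [List.mem_singleton] at hx; exact hx ▸ h1
  | cons t rest ih =>
    rintro s ⟨h1, _, hw⟩ x hx
    rcases List.mem_cons.mp hx with rfl | hx'
    · exact h1
    · exact ih t hw x hx'

theorem lookup_some_of_hasEnding (graph : List (String × List String)) (u : String)
    (h : hp_hasEnding graph u = true) : ∃ c, List.lookup u graph = some c := by
  unfold hp_hasEnding at h
  cases hl : List.lookup u graph with
  | none => rw [hl] at h; simp at h
  | some c => exact ⟨c, rfl⟩

theorem lookup_some_of_succ (graph : List (String × List String)) (u v : String)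
    (h : v ∈ hp_succ graph u) : ∃ c, List.lookup u graph = some c := by
  rw [mem_hp_succ] at h
  rcases h with ⟨t, ht, _⟩
  cases hl : List.lookup u graph with
  | none => rw [hl] at ht; simp at ht
  | some c => exact ⟨c, rfl⟩

theorem walk_keys (graph : List (String × List String)) (vis : List String) :
    ∀ (l : List String) (s : String), WalkFrom graph vis s l → ∀ x ∈ s :: l, x ∈ graph.map Prod.fst := by
  intro l
  induction l with
  | nil =>
    rintro s ⟨_, h2⟩ x hx
    rw [List.mem_singleton] at hx
    rcases lookup_some_of_hasEnding graph s h2 with ⟨c, hc⟩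
    exact hx ▸ pv_lookup_mem_keys graph s c hc
  | cons t rest ih =>
    rintro s ⟨_, hsucc, hw⟩ x hx
    rcases List.mem_cons.mp hx with rfl | hx'
    · rcases lookup_some_of_succ graph x t hsucc with ⟨c, hc⟩
      exact pv_lookup_mem_keys graph x c hc
    · exact ih t hw x hx'

theorem walk_anti (graph : List (String × List String)) (vis vis' : List String)
    (hsub : ∀ x, x ∈ vis → x ∈ vis') :
    ∀ (l : List String) (s : String), WalkFrom graph vis' s l → WalkFrom graph vis s l := by
  intro l
  induction l with
  | nil => rintro s ⟨h1, h2⟩; exact ⟨fun h => h1 (hsub s h), h2⟩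
  | cons t rest ih => rintro s ⟨h1, h2, h3⟩; exact ⟨fun h => h1 (hsub s h), h2, ih t h3⟩

theorem walk_strengthen (graph : List (String × List String)) (vis : List String) (s0 : String) :
    ∀ (l : List String) (s : String), WalkFrom graph vis s l → (∀ x ∈ s :: l, x ≠ s0) →
      WalkFrom graph (PySem.Set.add vis s0) s l := by
  intro l
  induction l with
  | nil =>
    rintro s ⟨h1, h2⟩ hne
    refine ⟨fun h => ?_, h2⟩
    rcases (PySem.Set.mem_add vis s0 s).mp h with h | h
    · exact h1 h
    · exact hne s (by simp) h
  | cons t rest ih =>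
    rintro s ⟨h1, h2, h3⟩ hne
    refine ⟨fun h => ?_, h2, ih t h3 (fun x hx => hne x (List.mem_cons_of_mem s hx))⟩
    rcases (PySem.Set.mem_add vis s0 s).mp h with h | h
    · exact h1 h
    · exact hne s (by simp) h

theorem walk_suffix (graph : List (String × List String)) (vis : List String) :
    ∀ (pre : List String) (a s : String) (suf : List String),
      WalkFrom graph vis a (pre ++ s :: suf) → WalkFrom graph vis s suf := by
  intro pre
  induction pre with
  | nil => rintro a s suf ⟨_, _, h3⟩; exact h3
  | cons b rest ih => rintro a s suf ⟨_, _, h3⟩; exact ih b s suf h3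

-- A's result, unfolded once (case lemmas)
theorem A_eq_false_of_contains (step_id : String) (graph : List (String × List String)) (visited : List String)
    (hc : PySem.Set.contains visited step_id = true) :
    has_path_to_ending_py step_id graph visited = false := by
  rw [has_path_to_ending_py.eq_def, if_pos hc]

theorem A_eq_none (step_id : String) (graph : List (String × List String)) (visited : List String)
    (hc : PySem.Set.contains visited step_id = false)
    (hl : List.lookup step_id graph = none) :
    has_path_to_ending_py step_id graph visited = false := by
  rw [has_path_to_ending_py.eq_def, if_neg (by rw [hc]; simp)]
  split <;> simp_all

theorem A_eq_some (step_id : String) (graph : List (String × List String)) (visited : List String)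
    (conns : List String)
    (hc : PySem.Set.contains visited step_id = false)
    (hl : List.lookup step_id graph = some conns) :
    has_path_to_ending_py step_id graph visited =
      conns.any (fun target =>
        if PySem.Str.startswith target "ENDING_" then true
        else if PySem.Str.startswith target "STEP_" || PySem.Str.strIsdigit target then
          has_path_to_ending_py
            (if PySem.Str.startswith target "STEP_" then PySem.Str.replace target "STEP_" "" else target)
            graph (PySem.Set.add visited step_id)
        else false) := by
  rw [has_path_to_ending_py.eq_def, if_neg (by rw [hc]; simp)]
  split <;> simp_all

-- L1: a walk to an ending makes A return True
theorem walk_to_A (graph : List (String × List String)) :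
    ∀ (n : Nat) (l : List String) (s : String) (vis : List String), l.length < n →
      WalkFrom graph vis s l → has_path_to_ending_py s graph vis = true := by
  intro n
  induction n with
  | zero => intro l s vis h; omega
  | succ n ih =>
    intro l s vis hlen hw
    have hsnv : s ∉ vis := walk_avoid graph vis l s hw s (by simp)
    have hc : PySem.Set.contains vis s = false := by
      rw [← Bool.not_eq_true]; intro h; exact hsnv ((PySem.Set.contains_iff vis s).mp h)
    cases l with
    | nil =>
      rcases hw with ⟨_, hend⟩
      rcases lookup_some_of_hasEnding graph s hend with ⟨conns, hl⟩
      rw [A_eq_some s graph vis conns hc hl]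
      unfold hp_hasEnding at hend
      rw [hl] at hend
      simp only [Option.getD_some] at hend
      rcases List.any_eq_true.mp hend with ⟨t, ht, hts⟩
      refine List.any_eq_true.mpr ⟨t, ht, ?_⟩
      rw [if_pos hts]
    | cons t l' =>
      rcases hw with ⟨_, hsucc, hwt⟩
      by_cases hmem : s ∈ t :: l'
      · -- the walk revisits s: recurse on the (strictly shorter) suffix starting at s
        rcases List.append_of_mem hmem with ⟨pre, suf, hsplit⟩
        have hwsuf : WalkFrom graph vis s suf := by
          have hw' : WalkFrom graph vis s (t :: l') := ⟨hsnv, hsucc, hwt⟩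
          exact walk_suffix graph vis pre s s suf (hsplit ▸ hw')
        have hsuflen : suf.length < n := by
          have hlsp : (t :: l').length = pre.length + (suf.length + 1) := by
            rw [hsplit]; simp
          simp only [List.length_cons] at hlen hlsp
          omega
        exact ih suf s vis hsuflen hwsuf
      · -- the walk after s avoids s: recurse into the neighbour with s in visited
        have hne : ∀ x ∈ t :: l', x ≠ s := fun x hx hxs => hmem (hxs ▸ hx)
        have hwt' : WalkFrom graph (PySem.Set.add vis s) t l' :=
          walk_strengthen graph vis s l' t hwt hne
        have hrec : has_path_to_ending_py t graph (PySem.Set.add vis s) = true := by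
          apply ih l' t (PySem.Set.add vis s) (by simp at hlen; omega) hwt'
        rcases lookup_some_of_succ graph s t hsucc with ⟨conns, hl⟩
        rw [A_eq_some s graph vis conns hc hl]
        rw [mem_hp_succ] at hsucc
        rcases hsucc with ⟨tgt, htgt, hshape, hclean⟩
        rw [hl] at htgt
        simp only [Option.getD_some] at htgt
        refine List.any_eq_true.mpr ⟨tgt, htgt, ?_⟩
        by_cases hend : PySem.Str.startswith tgt "ENDING_" = true
        · rw [if_pos hend]
        · rw [if_neg hend]
          have hsh : (PySem.Str.startswith tgt "STEP_" || PySem.Str.strIsdigit tgt) = true := hshape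
          rw [if_pos hsh]
          have harg : (if PySem.Str.startswith tgt "STEP_" = true
              then PySem.Str.replace tgt "STEP_" "" else tgt) = t := by
            rw [← hclean]; rfl
          rw [harg]
          exact hrec

-- L2: if A returns True there is a duplicate-free walk to an ending
theorem A_to_walk (graph : List (String × List String)) :
    ∀ (n : Nat) (vis : List String) (s : String), pvMeasure graph vis < n →
      has_path_to_ending_py s graph vis = true →
      ∃ l, WalkFrom graph vis s l ∧ (s :: l).Nodup := by
  intro n
  induction n with
  | zero => intro vis s h; omega
  | succ n ih =>
    intro vis s hm hA
    by_cases hc : PySem.Set.contains vis s = true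
    · rw [A_eq_false_of_contains s graph vis hc] at hA; exact absurd hA (by simp)
    · have hc' : PySem.Set.contains vis s = false := by simpa using hc
      have hsnv : s ∉ vis := by simpa using hc'
      cases hl : List.lookup s graph with
      | none => rw [A_eq_none s graph vis hc' hl] at hA; exact absurd hA (by simp)
      | some conns =>
        rw [A_eq_some s graph vis conns hc' hl] at hA
        rcases List.any_eq_true.mp hA with ⟨tgt, htgt, hval⟩
        by_cases hend : PySem.Str.startswith tgt "ENDING_" = true
        · refine ⟨[], ⟨hsnv, ?_⟩, by simp⟩
          unfold hp_hasEnding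
          rw [hl]
          simp only [Option.getD_some]
          exact List.any_eq_true.mpr ⟨tgt, htgt, hend⟩
        · rw [if_neg hend] at hval
          by_cases hsh : (PySem.Str.startswith tgt "STEP_" || PySem.Str.strIsdigit tgt) = true
          · rw [if_pos hsh] at hval
            have hkey : s ∈ graph.map Prod.fst := pv_lookup_mem_keys graph s conns hl
            have hm' : pvMeasure graph (PySem.Set.add vis s) < n := by
              have := pv_measure_lt graph vis s hkey hc'
              omega
            rcases ih (PySem.Set.add vis s) _ hm' hval with ⟨l₁, hw₁, hnd₁⟩
            set t := (if PySem.Str.startswith tgt "STEP_" = true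
              then PySem.Str.replace tgt "STEP_" "" else tgt) with ht_def
            have hsucc : t ∈ hp_succ graph s := by
              rw [mem_hp_succ]
              refine ⟨tgt, by rw [hl]; simpa using htgt, hsh, ?_⟩
              rw [pvClean, ht_def]
            have havoid : ∀ x ∈ t :: l₁, x ∉ PySem.Set.add vis s :=
              walk_avoid graph (PySem.Set.add vis s) l₁ t hw₁
            have hsmem : s ∈ PySem.Set.add vis s :=
              (PySem.Set.mem_add vis s s).mpr (Or.inr rfl)
            refine ⟨t :: l₁, ⟨hsnv, hsucc, walk_anti graph vis (PySem.Set.add vis s)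
              (fun x hx => (PySem.Set.mem_add vis s x).mpr (Or.inl hx)) l₁ t hw₁⟩, ?_⟩
            rw [List.nodup_cons]
            exact ⟨fun hx => havoid s hx hsmem, hnd₁⟩
          · rw [if_neg hsh] at hval
            exact absurd hval (by simp)

theorem pv_mem_keys_lookup {β : Type} (l : List (String × β)) (a : String)
    (h : a ∈ l.map Prod.fst) : ∃ b, List.lookup a l = some b := by
  induction l with
  | nil => simp at h
  | cons p t ih =>
    obtain ⟨k, v⟩ := p
    rw [List.lookup]
    by_cases hpa : a == k
    · rw [hpa]; exact ⟨v, rfl⟩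
    · have hpa2 : (a == k) = false := by simpa using hpa
      rw [hpa2]
      apply ih
      rw [List.map_cons] at h
      rcases List.mem_cons.mp h with h1 | h1
      · exact absurd h1 (by simpa using hpa)
      · exact h1

theorem pv_lookup_mem {β : Type} (l : List (String × β)) (a : String) (b : β)
    (h : List.lookup a l = some b) : (a, b) ∈ l := by
  induction l with
  | nil => simp [List.lookup] at h
  | cons p t ih =>
    obtain ⟨k, v⟩ := p
    rw [List.lookup] at h
    by_cases hpa : a == k
    · have h2 : a = k := by simpa using hpa
      subst h2
      have hvb : v = b := by simpa using h
      simp [hvb]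
    · have hpa2 : (a == k) = false := by simpa using hpa
      rw [hpa2] at h
      exact List.mem_cons_of_mem _ (ih h)

theorem pv_nodup_lookup {β : Type} (l : List (String × β)) (a : String) (b : β)
    (hnd : (l.map Prod.fst).Nodup) (h : (a, b) ∈ l) : List.lookup a l = some b := by
  induction l with
  | nil => simp at h
  | cons p t ih =>
    obtain ⟨k, v⟩ := p
    rw [List.map_cons, List.nodup_cons] at hnd
    rw [List.lookup]
    rcases List.mem_cons.mp h with heq | hmem
    · obtain ⟨h1, h2⟩ := Prod.mk.injEq .. ▸ heq
      injection heq with h1 h2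
      subst h1; subst h2
      simp
    · by_cases hak : a == k
      · have hak' : a = k := by simpa using hak
        subst hak'
        exact absurd (List.mem_map.mpr ⟨(a, b), hmem, rfl⟩) hnd.1
      · have hak2 : (a == k) = false := by simpa using hak
        rw [hak2]
        exact ih hnd.2 hmem

-- B's per-target test (what the inner-loop fold turns `ok` true for)
def hpHit (g : PySem.Set String) (t : String) : Bool :=
  if PySem.Str.startswith t "ENDING_" then true
  else if PySem.Str.startswith t "STEP_" then PySem.Set.contains g (PySem.Str.replace t "STEP_" "")
  else if PySem.Str.strIsdigit t then PySem.Set.contains g t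
  else false

theorem rowOk_eq_any (g : PySem.Set String) (conns : List String) :
    hpB_rowOk g conns = conns.any (hpHit g) := by
  unfold hpB_rowOk
  suffices h : ∀ b, conns.foldl (fun ok t =>
      if PySem.Str.startswith t "ENDING_" then true
      else if PySem.Str.startswith t "STEP_" then
        (if PySem.Set.contains g (PySem.Str.replace t "STEP_" "") then true else ok)
      else if PySem.Str.strIsdigit t then
        (if PySem.Set.contains g t then true else ok)
      else ok) b = (b || conns.any (hpHit g)) by
    rw [h false]; simp
  induction conns with
  | nil => intro b; simp
  | cons t rest ih =>
    intro b
    rw [List.foldl_cons, ih, List.any_cons]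
    have hstep : (if PySem.Str.startswith t "ENDING_" then true
        else if PySem.Str.startswith t "STEP_" then
          (if PySem.Set.contains g (PySem.Str.replace t "STEP_" "") then true else b)
        else if PySem.Str.strIsdigit t then
          (if PySem.Set.contains g t then true else b)
        else b) = (b || hpHit g t) := by
      unfold hpHit
      split_ifs <;> simp_all [PySem.Set.contains_iff]
    rw [hstep]
    cases b <;> simp

theorem hpHit_iff (g : PySem.Set String) (t : String) :
    hpHit g t = true ↔
      PySem.Str.startswith t "ENDING_" = true ∨ (pvShape t = true ∧ pvClean t ∈ g) := by
  unfold hpHit pvShape pvClean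
  split_ifs with h1 h2 h3 <;>
    simp_all [PySem.Set.contains_iff]

theorem hpHit_mono (g g' : PySem.Set String) (t : String)
    (hsub : ∀ x ∈ g, x ∈ g') (h : hpHit g t = true) : hpHit g' t = true := by
  rw [hpHit_iff] at h ⊢
  rcases h with h | ⟨h1, h2⟩
  · exact Or.inl h
  · exact Or.inr ⟨h1, hsub _ h2⟩

-- the effect of one round on `good` alone (the `added` flag stripped)
def hpRound_step (blocked : PySem.Set String) (good : PySem.Set String) (entry : String × List String) : PySem.Set String :=
  if PySem.Set.contains blocked entry.1 || PySem.Set.contains good entry.1 then good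
  else if hpB_rowOk good entry.2 then PySem.Set.add good entry.1 else good

theorem step_supset (blocked g : PySem.Set String) (p : String × List String)
    (x : String) (hx : x ∈ g) : x ∈ hpRound_step blocked g p := by
  unfold hpRound_step
  split_ifs <;> first
    | exact hx
    | exact (PySem.Set.mem_add g p.1 x).mpr (Or.inl hx)

theorem fold_supset (blocked : PySem.Set String) (entries : List (String × List String)) :
    ∀ (g : PySem.Set String) (x : String), x ∈ g → x ∈ entries.foldl (hpRound_step blocked) g := by
  induction entries with
  | nil => intro g x hx; simpa using hx
  | cons p rest ih =>
    intro g x hx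
    rw [List.foldl_cons]
    exact ih _ x (step_supset blocked g p x hx)

theorem step_cases (blocked g : PySem.Set String) (p : String × List String)
    (u : String) (hu : u ∈ hpRound_step blocked g p) :
    u ∈ g ∨ (u = p.1 ∧ PySem.Set.contains blocked p.1 = false ∧ hpB_rowOk g p.2 = true) := by
  unfold hpRound_step at hu
  split_ifs at hu with h1 h2
  · exact Or.inl hu
  · rcases (PySem.Set.mem_add g p.1 u).mp hu with h | h
    · exact Or.inl h
    · refine Or.inr ⟨h, ?_, h2⟩
      simp only [Bool.or_eq_true, not_or, Bool.not_eq_true] at h1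
      exact h1.1
  · exact Or.inl hu

-- invariant of B's saturation: every member of `good` has a walk to an ending avoiding vis
def GoodInv (graph : List (String × List String)) (vis : List String) (g : PySem.Set String) : Prop :=
  ∀ u ∈ g, u ∉ vis ∧ ∃ l, WalkFrom graph vis u l

theorem fold_sound (graph : List (String × List String)) (vis : List String) :
    ∀ (entries : List (String × List String)) (g : PySem.Set String),
      (∀ p ∈ entries, List.lookup p.1 graph = some p.2) →
      GoodInv graph vis g →
      GoodInv graph vis (entries.foldl (hpRound_step (PySem.Set.ofList vis)) g) := by
  intro entries
  induction entries with
  | nil => intro g _ hInv; simpa using hInv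
  | cons p rest ih =>
    intro g hlk hInv
    rw [List.foldl_cons]
    refine ih _ (fun q hq => hlk q (List.mem_cons_of_mem p hq)) ?_
    intro u hu
    rcases step_cases _ g p u hu with hin | ⟨rfl, hb, hok⟩
    · exact hInv u hin
    · have hlkp : List.lookup p.1 graph = some p.2 := hlk p List.mem_cons_self
      have hnv : p.1 ∉ vis := by
        intro hv
        have : PySem.Set.contains (PySem.Set.ofList vis) p.1 = true :=
          (PySem.Set.contains_iff _ _).mpr ((PySem.Set.mem_ofList vis p.1).mpr hv)
        rw [this] at hb; exact absurd hb (by simp)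
      rw [rowOk_eq_any] at hok
      rcases List.any_eq_true.mp hok with ⟨t, ht, hhit⟩
      rcases (hpHit_iff g t).mp hhit with hend | ⟨hsh, hcl⟩
      · refine ⟨hnv, [], hnv, ?_⟩
        unfold hp_hasEnding
        rw [hlkp]
        simp only [Option.getD_some]
        exact List.any_eq_true.mpr ⟨t, ht, hend⟩
      · rcases hInv _ hcl with ⟨_, l, hw⟩
        refine ⟨hnv, pvClean t :: l, hnv, ?_, hw⟩
        rw [mem_hp_succ, hlkp]
        exact ⟨t, by simpa using ht, hsh, rfl⟩

-- B's fold adds u whenever u's graph entry is hit by the current good set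
theorem fold_adds (blocked : PySem.Set String) (u : String) (conns : List String)
    (g0 : PySem.Set String) (hb : PySem.Set.contains blocked u = false)
    (hok : hpB_rowOk g0 conns = true) :
    ∀ (entries : List (String × List String)) (g : PySem.Set String),
      (u, conns) ∈ entries → (∀ x ∈ g0, x ∈ g) →
      u ∈ entries.foldl (hpRound_step blocked) g := by
  intro entries
  induction entries with
  | nil => intro g h; simp at h
  | cons p rest ih =>
    intro g hmem hsub
    rw [List.foldl_cons]
    rcases List.mem_cons.mp hmem with heq | htail
    · -- this entry is (u, conns)
      subst heq
      by_cases hg : PySem.Set.contains g u = true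
      · exact fold_supset blocked rest _ u
          (step_supset blocked g (u, conns) u ((PySem.Set.contains_iff g u).mp hg))
      · have hg' : PySem.Set.contains g u = false := by simpa using hg
        have hok' : hpB_rowOk g conns = true := by
          rw [rowOk_eq_any] at hok ⊢
          rcases List.any_eq_true.mp hok with ⟨t, ht, hhit⟩
          exact List.any_eq_true.mpr ⟨t, ht, hpHit_mono g0 g t hsub hhit⟩
        have hstep : hpRound_step blocked g (u, conns) = PySem.Set.add g u := by
          unfold hpRound_step
          rw [if_neg (by simp only [Bool.or_eq_true, not_or, Bool.not_eq_true]; exact ⟨hb, hg'⟩), if_pos hok']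
        rw [hstep]
        exact fold_supset blocked rest _ u ((PySem.Set.mem_add g u u).mpr (Or.inr rfl))
    · exact ih _ htail (fun x hx => step_supset blocked g p x (hsub x hx))

-- r rounds of B's saturation loop
def goodIter (graph : List (String × List String)) (blocked : PySem.Set String) : Nat → PySem.Set String
  | 0 => PySem.Set.empty
  | r + 1 => graph.foldl (hpRound_step blocked) (goodIter graph blocked r)

-- the flagged inner fold computes the same `good` as the flag-free one …
theorem fold2_fst (blocked : PySem.Set String) :
    ∀ (entries : List (String × List String)) (st : PySem.Set String × Bool),
      (entries.foldl (hpB_step blocked) st).1 = entries.foldl (hpRound_step blocked) st.1 := by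
  intro entries
  induction entries with
  | nil => intro st; rfl
  | cons e rest ih =>
    intro st
    rw [List.foldl_cons, List.foldl_cons, ih]
    have hstep : (hpB_step blocked st e).1 = hpRound_step blocked st.1 e := by
      unfold hpB_step hpRound_step
      split_ifs <;> rfl
    rw [hstep]

-- … its flag never falls back to false …
theorem fold2_snd_mono (blocked : PySem.Set String) :
    ∀ (entries : List (String × List String)) (st : PySem.Set String × Bool),
      st.2 = true → (entries.foldl (hpB_step blocked) st).2 = true := by
  intro entries
  induction entries with
  | nil => intro st h; simpa using h
  | cons e rest ih =>
    intro st h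
    rw [List.foldl_cons]
    refine ih _ ?_
    unfold hpB_step
    split_ifs <;> simpa using h

-- … and a round that reports `added = False` changed nothing
theorem fold2_snd_false (blocked : PySem.Set String) :
    ∀ (entries : List (String × List String)) (g : PySem.Set String),
      (entries.foldl (hpB_step blocked) (g, false)).2 = false →
      entries.foldl (hpRound_step blocked) g = g := by
  intro entries
  induction entries with
  | nil => intro g _; rfl
  | cons e rest ih =>
    intro g h
    rw [List.foldl_cons] at h ⊢
    by_cases hc : (PySem.Set.contains blocked e.1 || PySem.Set.contains g e.1) = true
    · have h1 : hpB_step blocked (g, false) e = (g, false) := by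
        unfold hpB_step; rw [if_pos hc]
      have h2 : hpRound_step blocked g e = g := by
        unfold hpRound_step; rw [if_pos hc]
      rw [h1] at h
      rw [h2]
      exact ih g h
    · by_cases hok : hpB_rowOk g e.2 = true
      · have h1 : hpB_step blocked (g, false) e = (PySem.Set.add g e.1, true) := by
          unfold hpB_step; rw [if_neg hc, if_pos hok]
        rw [h1, fold2_snd_mono blocked rest _ rfl] at h
        exact absurd h (by simp)
      · have h1 : hpB_step blocked (g, false) e = (g, false) := by
          unfold hpB_step; rw [if_neg hc, if_neg hok]
        have h2 : hpRound_step blocked g e = g := by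
          unfold hpRound_step; rw [if_neg hc, if_neg hok]
        rw [h1] at h
        rw [h2]
        exact ih g h

-- iterating rounds from a given `good` set (inside-out form of goodIter)
def roundIter (blocked : PySem.Set String) (graph : List (String × List String)) : Nat → PySem.Set String → PySem.Set String
  | 0, g => g
  | k + 1, g => roundIter blocked graph k (graph.foldl (hpRound_step blocked) g)

theorem roundIter_fix (blocked : PySem.Set String) (graph : List (String × List String))
    (g : PySem.Set String) (hfix : graph.foldl (hpRound_step blocked) g = g) :
    ∀ k, roundIter blocked graph k g = g := by
  intro k
  induction k with
  | zero => rfl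
  | succ n ih => rw [roundIter, hfix]; exact ih

theorem outer_stopped (blocked : PySem.Set String) (graph : List (String × List String)) :
    ∀ (rl : List Nat) (g : PySem.Set String),
      rl.foldl (hpB_outer blocked graph) (g, true) = (g, true) := by
  intro rl
  induction rl with
  | nil => intro g; rfl
  | cons i rest ih =>
    intro g
    rw [List.foldl_cons]
    have h1 : hpB_outer blocked graph (g, true) i = (g, true) := by
      unfold hpB_outer; rw [if_pos rfl]
    rw [h1]
    exact ih g

-- the whole break-guarded outer loop computes roundIter
theorem outer_run (blocked : PySem.Set String) (graph : List (String × List String)) :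
    ∀ (rl : List Nat) (g : PySem.Set String),
      (rl.foldl (hpB_outer blocked graph) (g, false)).1 = roundIter blocked graph rl.length g := by
  intro rl
  induction rl with
  | nil => intro g; rfl
  | cons i rest ih =>
    intro g
    rw [List.foldl_cons, List.length_cons]
    have houter : hpB_outer blocked graph (g, false) i =
        ((graph.foldl (hpB_step blocked) (g, false)).1,
         !(graph.foldl (hpB_step blocked) (g, false)).2) := by
      unfold hpB_outer
      rw [if_neg (by simp)]
    rw [houter, fold2_fst]
    cases hfl : (graph.foldl (hpB_step blocked) (g, false)).2 with
    | true =>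
      show (rest.foldl (hpB_outer blocked graph)
          (graph.foldl (hpRound_step blocked) g, false)).1 = roundIter blocked graph (rest.length + 1) g
      rw [ih]
      rfl
    | false =>
      have hfix := fold2_snd_false blocked graph g hfl
      show (rest.foldl (hpB_outer blocked graph)
          (graph.foldl (hpRound_step blocked) g, true)).1 = roundIter blocked graph (rest.length + 1) g
      rw [hfix, outer_stopped]
      show g = roundIter blocked graph (rest.length + 1) g
      rw [roundIter, hfix, roundIter_fix blocked graph g hfix]

theorem roundIter_succ_out (blocked : PySem.Set String) (graph : List (String × List String)) :
    ∀ (k : Nat) (g : PySem.Set String),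
      roundIter blocked graph (k + 1) g = graph.foldl (hpRound_step blocked) (roundIter blocked graph k g) := by
  intro k
  induction k with
  | zero => intro g; rfl
  | succ n ih => intro g; rw [roundIter, ih]; rfl

theorem goodIter_eq_roundIter (blocked : PySem.Set String) (graph : List (String × List String)) :
    ∀ r, goodIter graph blocked r = roundIter blocked graph r PySem.Set.empty := by
  intro r
  induction r with
  | zero => rfl
  | succ k ih => rw [goodIter, ih, roundIter_succ_out]

theorem iter_sound (graph : List (String × List String)) (vis : List String)
    (hnd : (graph.map Prod.fst).Nodup) :
    ∀ r, GoodInv graph vis (goodIter graph (PySem.Set.ofList vis) r) := by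
  intro r
  induction r with
  | zero => intro u hu; simp [goodIter, PySem.Set.empty] at hu
  | succ k ih =>
    exact fold_sound graph vis graph _
      (fun p hp => pv_nodup_lookup graph p.1 p.2 hnd (by simpa using hp)) ih

theorem iter_complete (graph : List (String × List String)) (vis : List String) :
    ∀ (r : Nat) (l : List String) (u : String), l.length < r →
      WalkFrom graph vis u l → u ∈ goodIter graph (PySem.Set.ofList vis) r := by
  intro r
  induction r with
  | zero => intro l u h; omega
  | succ k ih =>
    intro l u hlen hw
    have hnv : u ∉ vis := walk_avoid graph vis l u hw u (by simp)
    have hb : PySem.Set.contains (PySem.Set.ofList vis) u = false := by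
      rw [← Bool.not_eq_true]
      intro h
      exact hnv ((PySem.Set.mem_ofList vis u).mp ((PySem.Set.contains_iff _ u).mp h))
    have hkey : u ∈ graph.map Prod.fst := walk_keys graph vis l u hw u (by simp)
    rcases pv_mem_keys_lookup graph u hkey with ⟨conns, hlk⟩
    have hmem : (u, conns) ∈ graph := pv_lookup_mem graph u conns hlk
    cases l with
    | nil =>
      rcases hw with ⟨_, hend⟩
      unfold hp_hasEnding at hend
      rw [hlk] at hend
      simp only [Option.getD_some] at hend
      rcases List.any_eq_true.mp hend with ⟨t, ht, hte⟩
      have hok : hpB_rowOk (goodIter graph (PySem.Set.ofList vis) k) conns = true := by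
        rw [rowOk_eq_any]
        exact List.any_eq_true.mpr ⟨t, ht, (hpHit_iff _ t).mpr (Or.inl hte)⟩
      exact fold_adds _ u conns _ hb hok graph _ hmem (fun x hx => hx)
    | cons t l' =>
      rcases hw with ⟨_, hsucc, hwt⟩
      have hin : t ∈ goodIter graph (PySem.Set.ofList vis) k :=
        ih l' t (by simp at hlen; omega) hwt
      rw [mem_hp_succ, hlk] at hsucc
      simp only [Option.getD_some] at hsucc
      rcases hsucc with ⟨tgt, htgt, hsh, hcl⟩
      have hok : hpB_rowOk (goodIter graph (PySem.Set.ofList vis) k) conns = true := by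
        rw [rowOk_eq_any]
        exact List.any_eq_true.mpr ⟨tgt, htgt, (hpHit_iff _ tgt).mpr (Or.inr ⟨hsh, hcl ▸ hin⟩)⟩
      exact fold_adds _ u conns _ hb hok graph _ hmem (fun x hx => hx)

theorem alt_mem_iff (step_id : String) (graph : List (String × List String)) (visited : List String) :
    has_path_to_ending_py_alt step_id graph visited = true ↔
      step_id ∈ goodIter graph (PySem.Set.ofList visited) graph.length := by
  unfold has_path_to_ending_py_alt
  rw [outer_run, List.length_range, ← goodIter_eq_roundIter]
  exact PySem.Set.contains_iff _ _

-- ===== VERDICT (by name: the statement is the Claim_ definition above) =====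
theorem has_path_to_ending_py_spec : Claim_equal_has_path_to_ending_py := by
  intro s graph vis _dom hnd
  unfold Spec_has_path_to_ending_py
  rw [Bool.eq_iff_iff, alt_mem_iff s graph vis]
  constructor
  · intro hA
    rcases A_to_walk graph (pvMeasure graph vis + 1) vis s (by omega) hA with ⟨l, hw, hndl⟩
    have hsub : (s :: l) ⊆ graph.map Prod.fst := fun x hx => walk_keys graph vis l s hw x hx
    have hle : (s :: l).length ≤ (graph.map Prod.fst).length :=
      (hndl.subperm hsub).length_le
    rw [List.length_map] at hle
    exact iter_complete graph vis graph.length l s (by simp at hle; omega) hw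
  · intro hmem
    rcases iter_sound graph vis hnd graph.length s hmem with ⟨_, l, hw⟩
    exact walk_to_A graph (l.length + 1) l s vis (by omega) hw
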